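-- pv_equiv track=rewrite | github.com/majogg23/ejerciciosPhyton | ej unidad 4.py | esTelescopio
-- ===== SOURCE A (Python) =====
-- def esTelescopio(n, vec):
--     for i in range(len(vec) - 1):
--         if vec[i] > vec[i + 1]:
--             return False
--
--     # Verificar que cada número i entre 1 y n aparece exactamente i veces
--     for i in range(1, n + 1):
--         if vec.count(i) != i:
--             return False
--         return True
-- ===== SOURCE B (Python) =====
-- def esTelescopio(n, vec):
--     if vec != sorted(vec):
--         return False
--     counts = {}
--     for x in vec:
--         counts[x] = counts.get(x, 0) + 1
--     return all(counts.get(i, 0) == i for i in range(1, n + 1))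
-- ===== Notes on version B (the rewrite author's own statement) =====
-- stated objective: idiomatic
-- what changed: Replaces the index-based pairwise scan with a single sorted-copy comparison and the per-i vec.count rescans with one counting dict checked by all(...) over 1..n; Pre_ excludes sorted inputs with n < 1, on which A falls off the end and returns None instead of a bool.
-- intended difference: On sorted vectors with n >= 2, count(1) == 1 but some count(i) != i for an i in 2..n, A returns True because its second loop returns inside its first iteration after checking only i = 1, while B returns False, the intended answer of the telescope check. — e.g. on esTelescopio(2, [1, 2]): A returns true, B returns false
-- outside the precondition, e.g. on esTelescopio(0, []): A returns None, B returns True; on esTelescopio(-1, [1, 2]): A returns None, B returns True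
import Mathlib
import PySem

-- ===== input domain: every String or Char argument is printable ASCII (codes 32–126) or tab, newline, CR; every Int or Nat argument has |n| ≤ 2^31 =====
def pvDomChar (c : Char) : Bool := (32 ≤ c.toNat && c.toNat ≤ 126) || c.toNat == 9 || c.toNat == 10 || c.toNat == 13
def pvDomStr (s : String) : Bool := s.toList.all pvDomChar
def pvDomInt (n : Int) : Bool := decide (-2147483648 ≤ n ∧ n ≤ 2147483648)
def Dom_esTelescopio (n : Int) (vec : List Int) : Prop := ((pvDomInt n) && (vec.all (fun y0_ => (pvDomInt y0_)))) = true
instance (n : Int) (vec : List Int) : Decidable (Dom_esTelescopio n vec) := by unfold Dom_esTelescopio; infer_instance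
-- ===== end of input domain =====

-- B replaces A's index-based pairwise scan with a sorted-copy comparison and A's
-- per-i count rescans with one counting dict checked over 1..n (objective: idiomatic).

-- ===== PORT A =====
-- first loop of A: for i in range(len(vec)-1): if vec[i] > vec[i+1]: return False
def esTelescopioLoop1 (vec : List Int) : List Int → Option Bool
  | [] => none
  | i :: rest =>
    match PySem.List.pyGet? vec i, PySem.List.pyGet? vec (i + 1) with
    | some a, some b => if a > b then some false else esTelescopioLoop1 vec rest
    | _, _ => none   -- unreachable: indices from range(len(vec)-1) are in range

def esTelescopio (n : Int) (vec : List Int) : Bool :=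
  match esTelescopioLoop1 vec (PySem.List.pyRange 0 (PySem.List.len vec - 1) 1) with
  | some b => b
  | none =>
    -- second loop of A: for i in range(1, n+1): if vec.count(i) != i: return False; return True
    -- the body unconditionally returns, so only the first element i = 1 of the range runs
    if 1 < n + 1 then
      (if (PySem.List.count vec 1 : Int) ≠ 1 then false else true)
    else false   -- Python falls off the end and returns None here; excluded by Pre_

-- ===== PORT B =====
-- all(counts.get(i, 0) == i for i in range(1, n + 1)): the generator yields the
-- (n + 1 - 1).toNat items of the range and all(...) stops at the first false
def esTelescopioAltAll (counts : PySem.Dict Int Int) : Nat → Int → Bool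
  | 0, _ => true
  | fuel + 1, i =>
    if counts.getD i 0 == i then esTelescopioAltAll counts fuel (i + 1) else false

def esTelescopio_alt (n : Int) (vec : List Int) : Bool :=
  if vec ≠ PySem.List.sorted vec (fun x => x) false then false
  else
    let counts := vec.foldl (fun d x => d.insert x (d.getD x 0 + 1)) PySem.Dict.empty
    esTelescopioAltAll counts (n + 1 - 1).toNat 1

-- ===== PRECONDITION & SPEC =====
-- Pre_ excludes exactly the inputs (pairwise non-decreasing vec with n < 1) on which A
-- falls off the end of the function and returns None, which is not a Bool.
def Pre_esTelescopio (n : Int) (vec : List Int) : Prop :=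
  1 ≤ n ∨ ¬ vec.IsChain (· ≤ ·)
instance (n : Int) (vec : List Int) : Decidable (Pre_esTelescopio n vec) := by
  unfold Pre_esTelescopio; infer_instance
def pvWitness_esTelescopio : Int × List Int := (2, [1, 2, 2])

-- On sorted vectors with n ≥ 2, count(1) == 1 but some count(i) ≠ i for an i in 2..n,
-- A returns True because its second loop returns inside its first iteration after
-- checking only i = 1, while B returns False, the intended answer of the telescope check.
def D_esTelescopio (n : Int) (vec : List Int) : Prop :=
  vec.IsChain (· ≤ ·) ∧ vec.count 1 = 1 ∧
    ∃ i ∈ PySem.List.pyRange 2 (min (n + 1) ((vec.length : Int) + 2)) 1, (vec.count i : Int) ≠ i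
instance (n : Int) (vec : List Int) : Decidable (D_esTelescopio n vec) := by
  unfold D_esTelescopio; infer_instance

def Spec_esTelescopio (n : Int) (vec : List Int) (out : Bool) : Prop :=
  ¬ D_esTelescopio n vec → out = esTelescopio_alt n vec
instance (n : Int) (vec : List Int) (out : Bool) : Decidable (Spec_esTelescopio n vec out) := by unfold Spec_esTelescopio; infer_instance

def pvDiffWitness_esTelescopio : Int × List Int := (2, [1, 2])
def pvDiffWitnessOut_esTelescopio : Bool × Bool := (true, false)

-- ===== CLAIM (what is proved, stated in full; the proofs are below) =====
def Claim_unchanged_esTelescopio : Prop := ∀ (n : Int) (vec : List Int), Dom_esTelescopio n vec → Pre_esTelescopio n vec → Spec_esTelescopio n vec (esTelescopio n vec)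
def Claim_changed_esTelescopio : Prop := Dom_esTelescopio (pvDiffWitness_esTelescopio.1) (pvDiffWitness_esTelescopio.2) ∧ Pre_esTelescopio (pvDiffWitness_esTelescopio.1) (pvDiffWitness_esTelescopio.2) ∧ D_esTelescopio (pvDiffWitness_esTelescopio.1) (pvDiffWitness_esTelescopio.2) ∧ esTelescopio (pvDiffWitness_esTelescopio.1) (pvDiffWitness_esTelescopio.2) = pvDiffWitnessOut_esTelescopio.1 ∧ esTelescopio_alt (pvDiffWitness_esTelescopio.1) (pvDiffWitness_esTelescopio.2) = pvDiffWitnessOut_esTelescopio.2 ∧ pvDiffWitnessOut_esTelescopio.1 ≠ pvDiffWitnessOut_esTelescopio.2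
def Claim_exact_esTelescopio : Prop := ∀ (n : Int) (vec : List Int), Dom_esTelescopio n vec → Pre_esTelescopio n vec → D_esTelescopio n vec → esTelescopio n vec ≠ esTelescopio_alt n vec

-- ===== LEMMAS AND PROOFS =====

-- A's first loop, started at index k, scans drop k vec for a descent
theorem esTelescopioLoop1_aux (vec : List Int) :
    ∀ (m k : Nat), vec.length - k ≤ m →
    esTelescopioLoop1 vec (PySem.List.pyRange (k : Int) (PySem.List.len vec - 1) 1)
      = if (vec.drop k).IsChain (· ≤ ·) then none else some false := by
  intro m
  induction m with
  | zero =>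
    intro k hk
    rw [PySem.List.pyRange_one_eq_nil (by simp; omega)]
    have : vec.drop k = [] := List.drop_eq_nil_of_le (by omega)
    simp [esTelescopioLoop1, this]
  | succ m ih =>
    intro k hk
    by_cases hlt : k + 1 < vec.length
    · rw [PySem.List.pyRange_one_cons (by simp; omega)]
      have h1 : PySem.List.pyGet? vec (k : Int) = some vec[k] := by
        rw [PySem.List.pyGet?_natCast]; simp [List.getElem?_eq_getElem (by omega : k < vec.length)]
      have h2 : PySem.List.pyGet? vec ((k : Int) + 1) = some vec[k + 1] := by
        have : (k : Int) + 1 = ((k + 1 : Nat) : Int) := by push_cast; ring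
        rw [this, PySem.List.pyGet?_natCast]; simp [List.getElem?_eq_getElem hlt]
      have hdk : vec.drop k = vec[k] :: vec.drop (k + 1) :=
        List.drop_eq_getElem_cons (by omega)
      have hdk1 : vec.drop (k + 1) = vec[k + 1] :: vec.drop (k + 2) :=
        List.drop_eq_getElem_cons hlt
      have hstep : ((k : Int) + 1) = ((k + 1 : Nat) : Int) := by push_cast; ring
      simp only [esTelescopioLoop1, h1, h2]
      by_cases hab : vec[k] > vec[k + 1]
      · have hnc : ¬ (vec.drop k).IsChain (· ≤ ·) := by
          rw [hdk, hdk1, List.isChain_cons_cons]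
          intro h; omega
        rw [if_pos hab, if_neg hnc]
      · rw [if_neg hab, hstep, ih (k + 1) (by omega)]
        have : (vec.drop k).IsChain (· ≤ ·) ↔ (vec.drop (k + 1)).IsChain (· ≤ ·) := by
          rw [hdk, hdk1, List.isChain_cons_cons, ← hdk1]
          constructor
          · exact fun h => h.2
          · exact fun h => ⟨by omega, h⟩
        rw [if_congr this rfl rfl]
    · rw [PySem.List.pyRange_one_eq_nil (by simp; omega)]
      have hch : (vec.drop k).IsChain (· ≤ ·) := by
        rcases Nat.lt_or_ge k vec.length with h | h
        · rw [List.drop_eq_getElem_cons h, List.drop_eq_nil_of_le (by omega)]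
          exact List.isChain_singleton _
        · rw [List.drop_eq_nil_of_le (by omega)]; exact List.isChain_nil
      simp [esTelescopioLoop1, hch]

theorem esTelescopioLoop1_char (vec : List Int) :
    esTelescopioLoop1 vec (PySem.List.pyRange 0 (PySem.List.len vec - 1) 1)
      = if vec.IsChain (· ≤ ·) then none else some false := by
  have := esTelescopioLoop1_aux vec vec.length 0 (by omega)
  simpa using this

-- vec == sorted(vec) iff vec is pairwise non-decreasing
theorem sorted_self_iff_chain' (vec : List Int) :
    vec = PySem.List.sorted vec (fun x => x) false ↔ vec.IsChain (· ≤ ·) := by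
  constructor
  · intro h
    have := PySem.List.sorted_pairwise vec (fun x => x)
    rw [← h] at this
    exact this.isChain
  · intro h
    exact (PySem.List.sorted_eq_self_of_pairwise vec (fun x => x) h.pairwise).symm

-- the counting dict built by B's loop holds the element counts of vec
theorem counts_getD (vec : List Int) (v : Int) :
    (vec.foldl (fun d x => d.insert x (d.getD x 0 + 1)) PySem.Dict.empty).getD v 0
      = (vec.count v : Int) := by
  rw [PySem.Dict.getD_foldl_insert_add_one, PySem.Dict.getD_empty]
  ring

-- B's short-circuit all(...) over fuel items starting at i is a universal count condition
theorem altAll_eq (counts : PySem.Dict Int Int) :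
    ∀ (fuel : Nat) (i : Int), esTelescopioAltAll counts fuel i
      = decide (∀ j : Int, i ≤ j → j < i + fuel → counts.getD j 0 = j) := by
  intro fuel
  induction fuel with
  | zero =>
    intro i
    have h : ∀ j : Int, i ≤ j → j < i + ((0 : Nat) : Int) → counts.getD j 0 = j := by
      intro j h1 h2
      exact absurd h1 (by push_cast at h2; omega)
    exact (decide_eq_true h).symm
  | succ fuel ih =>
    intro i
    rw [esTelescopioAltAll]
    by_cases hc : counts.getD i 0 == i
    · rw [if_pos hc, ih (i + 1), decide_eq_decide]
      have hci : counts.getD i 0 = i := by exact_mod_cast eq_of_beq hc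
      constructor
      · intro hall j h1 h2
        rcases eq_or_lt_of_le h1 with rfl | hlt
        · exact hci
        · exact hall j (by omega) (by push_cast at h2 ⊢; omega)
      · intro hall j h1 h2
        exact hall j (by omega) (by push_cast at h2 ⊢; omega)
    · rw [if_neg hc]
      refine (decide_eq_false fun hcon => ?_).symm
      exact hc (by simp [hcon i le_rfl (by push_cast; omega)])

-- B evaluated on a non-decreasing vector
theorem alt_char (n : Int) (vec : List Int) (hch : vec.IsChain (· ≤ ·)) :
    esTelescopio_alt n vec
      = decide (∀ j : Int, 1 ≤ j → j ≤ n → (vec.count j : Int) = j) := by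
  unfold esTelescopio_alt
  rw [if_neg (not_ne_iff.mpr ((sorted_self_iff_chain' vec).mpr hch))]
  rw [altAll_eq, decide_eq_decide]
  simp only [counts_getD]
  constructor
  · intro hall j h1 h2
    exact hall j h1 (by omega)
  · intro hall j h1 h2
    exact hall j h1 (by omega)

-- A evaluated on a non-decreasing vector with 1 ≤ n
theorem a_char (n : Int) (vec : List Int) (hch : vec.IsChain (· ≤ ·)) (hn : 1 ≤ n) :
    esTelescopio n vec = decide ((vec.count 1 : Int) = 1) := by
  unfold esTelescopio
  rw [esTelescopioLoop1_char, if_pos hch]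
  simp only [if_pos (by omega : (1 : Int) < n + 1)]
  by_cases hc : (PySem.List.count vec 1 : Int) ≠ 1
  · rw [if_pos hc]
    simp only [PySem.List.count_eq] at hc ⊢
    simp [hc]
  · rw [if_neg hc]
    rw [not_ne_iff] at hc
    simp only [PySem.List.count_eq] at hc ⊢
    simp [hc]

-- both return false on a vector with a descent
theorem both_false_of_not_chain (n : Int) (vec : List Int) (hch : ¬ vec.IsChain (· ≤ ·)) :
    esTelescopio n vec = false ∧ esTelescopio_alt n vec = false := by
  constructor
  · unfold esTelescopio
    rw [esTelescopioLoop1_char, if_neg hch]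
  · unfold esTelescopio_alt
    rw [if_pos (fun h => hch ((sorted_self_iff_chain' vec).mp h))]

-- inside D_, B finds a violated count
theorem alt_false_of_D (n : Int) (vec : List Int) (hd : D_esTelescopio n vec) :
    esTelescopio_alt n vec = false := by
  obtain ⟨hch, _, i, hmem, hic⟩ := hd
  rw [PySem.List.mem_pyRange_one] at hmem
  rw [alt_char n vec hch]
  simp only [decide_eq_false_iff_not]
  intro hall
  exact hic (hall i (by omega) (by omega))

-- ===== VERDICT (by name: the statement is the Claim_ definition above) =====
theorem esTelescopio_spec : Claim_unchanged_esTelescopio := by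
  intro n vec _ hpre
  unfold Spec_esTelescopio
  intro hnd
  by_cases hch : vec.IsChain (· ≤ ·)
  · have hn : 1 ≤ n := hpre.resolve_right (fun h => h hch)
    rw [a_char n vec hch hn, alt_char n vec hch, decide_eq_decide]
    constructor
    · intro hc1 j h1 h2
      rcases eq_or_lt_of_le h1 with rfl | hj2
      · exact hc1
      · -- a count at some j in 2..n may not be wrong, else D_ would hold
        by_contra hne
        apply hnd
        have hc1' : vec.count 1 = 1 := by exact_mod_cast hc1
        have hlen1 : 1 ≤ vec.length := by
          have := List.count_le_length (l := vec) (a := (1 : Int))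
          omega
        refine ⟨hch, hc1', ?_⟩
        by_cases hjl : j ≤ (vec.length : Int) + 1
        · exact ⟨j, by rw [PySem.List.mem_pyRange_one]; omega, hne⟩
        · refine ⟨(vec.length : Int) + 1, by rw [PySem.List.mem_pyRange_one]; omega, ?_⟩
          have hcle : vec.count ((vec.length : Int) + 1) ≤ vec.length := List.count_le_length
          omega
    · intro hall
      exact hall 1 le_rfl hn
  · obtain ⟨ha, hb⟩ := both_false_of_not_chain n vec hch
    rw [ha, hb]

theorem esTelescopio_changed : Claim_changed_esTelescopio := by
  unfold Claim_changed_esTelescopio; decide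

theorem esTelescopio_tight : Claim_exact_esTelescopio := by
  intro n vec _ _ hd
  have hn : 1 ≤ n := by
    obtain ⟨_, _, i, hmem, _⟩ := hd
    rw [PySem.List.mem_pyRange_one] at hmem
    omega
  have htrue : esTelescopio n vec = true := by
    rw [a_char n vec hd.1 hn]
    have : (vec.count 1 : Int) = 1 := by exact_mod_cast hd.2.1
    simp [this]
  rw [htrue, alt_false_of_D n vec hd]
  simp
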